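-- pv_equiv track=rewrite | github.com/zeiss-microscopy/OAD | notebooks/Read_CZI_and_OMETIFF_and_display_widgets_and_napari/imgfileutils.py | get_dimorder
-- ===== SOURCE A (Python) =====
-- def get_dimorder(dimstring):
--
--     dimindex_list = []
--     dims = ['B', 'S', 'T', 'C', 'Z', 'Y', 'X', '0']
--     dims_dict = {}
--
--     for d in dims:
--
--         dims_dict[d] = dimstring.find(d)
--         dimindex_list.append(dimstring.find(d))
--
--     numvalid_dims = sum(i > 0 for i in dimindex_list)
--
--     return dims_dict, dimindex_list, numvalid_dims
-- ===== SOURCE B (Python) =====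
-- def get_dimorder(dimstring):
--     # One backward pass over the string: walk it right-to-left, overwriting the entry of
--     # every dimension letter we meet, so the LAST write (the leftmost occurrence) wins.
--     dims = ['B', 'S', 'T', 'C', 'Z', 'Y', 'X', '0']
--     dims_dict = dict.fromkeys(dims, -1)
--     for i, ch in reversed(list(enumerate(dimstring))):
--         if ch in dims_dict:
--             dims_dict[ch] = i
--     dimindex_list = [dims_dict[d] for d in dims]
--     numvalid_dims = sum(i > 0 for i in dimindex_list)
--     return dims_dict, dimindex_list, numvalid_dims
-- ===== Notes on version B (the rewrite author's own statement) =====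
-- stated objective: alternative
-- what changed: Instead of scanning the string left-to-right eight times with str.find, B pre-initialises the table of dim letters to -1 and makes ONE backward pass over the string (reversed enumerate), overwriting the entry of every dim letter it meets so the last write -- the leftmost occurrence -- wins, then reads the list and the strict i > 0 count off the table.
import Mathlib
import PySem

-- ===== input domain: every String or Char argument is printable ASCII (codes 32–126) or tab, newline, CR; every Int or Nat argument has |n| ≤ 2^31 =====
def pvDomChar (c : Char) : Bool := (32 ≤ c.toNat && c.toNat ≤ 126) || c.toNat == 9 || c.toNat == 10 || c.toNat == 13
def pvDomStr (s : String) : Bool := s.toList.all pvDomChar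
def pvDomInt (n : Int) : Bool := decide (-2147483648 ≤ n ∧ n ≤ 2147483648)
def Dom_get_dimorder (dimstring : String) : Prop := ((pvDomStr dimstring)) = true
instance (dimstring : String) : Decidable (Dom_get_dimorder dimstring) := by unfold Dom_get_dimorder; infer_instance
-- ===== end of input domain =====

-- B replaces A's eight left-to-right str.find scans by ONE backward pass over the string that
-- overwrites a pre-initialised table, so the last (leftmost) write wins (objective: alternative).

-- ===== PORT A =====
def get_dimorder (dimstring : String) : (List (String × Int)) × List Int × Int :=
  let dims : List String := ["B", "S", "T", "C", "Z", "Y", "X", "0"]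
  let st := dims.foldl
    (fun (st : PySem.Dict String Int × List Int) d =>
      (st.1.insert d (PySem.Str.find dimstring d), st.2 ++ [PySem.Str.find dimstring d]))
    (PySem.Dict.empty, [])
  let numvalid_dims : Int := (st.2.map (fun i => if i > 0 then (1 : Int) else 0)).sum
  (st.1.items, st.2, numvalid_dims)

-- ===== PORT B =====
def get_dimorder_alt (dimstring : String) : (List (String × Int)) × List Int × Int :=
  let dims : List String := ["B", "S", "T", "C", "Z", "Y", "X", "0"]
  -- dict.fromkeys(dims, -1): the dim letters in order, each bound to -1
  let init : PySem.Dict String Int := dims.foldl (fun d k => d.insert k (-1)) PySem.Dict.empty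
  -- for i, ch in reversed(list(enumerate(dimstring))): if ch in dims_dict: dims_dict[ch] = i
  let dims_dict := ((PySem.List.enumerate dimstring.toList).reverse).foldl
    (fun (d : PySem.Dict String Int) p =>
      if d.contains (String.singleton p.2) then d.insert (String.singleton p.2) p.1 else d)
    init
  -- dims_dict[d] (every dim key is present, so KeyError is impossible)
  let dimindex_list := dims.map (fun k => (dims_dict.get? k).getD (-1))
  let numvalid_dims : Int := (dimindex_list.map (fun i => if i > 0 then (1 : Int) else 0)).sum
  (dims_dict.items, dimindex_list, numvalid_dims)

-- ===== PRECONDITION & SPEC =====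
def Spec_get_dimorder (dimstring : String) (out : (List (String × Int)) × List Int × Int) : Prop := out = get_dimorder_alt dimstring
instance (dimstring : String) (out : (List (String × Int)) × List Int × Int) : Decidable (Spec_get_dimorder dimstring out) := by unfold Spec_get_dimorder; infer_instance

-- ===== CLAIM (what is proved, stated in full; the proofs are below) =====
def Claim_equal_get_dimorder : Prop := ∀ (dimstring : String), Dom_get_dimorder dimstring → Spec_get_dimorder dimstring (get_dimorder dimstring)

-- ===== LEMMAS AND PROOFS =====

lemma pv_singleton_inj {a b : Char} (h : String.singleton a = String.singleton b) : a = b := by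
  have := congrArg String.toList h
  simpa [String.toList_singleton] using this

-- B's overwrite step never adds a key, so containment is preserved by the whole pass
lemma pv_fold_contains (l : List (Int × Char)) : ∀ (d : PySem.Dict String Int) (k : String),
    d.contains k = true →
    (l.foldl (fun (d : PySem.Dict String Int) p =>
        if d.contains (String.singleton p.2) then d.insert (String.singleton p.2) p.1 else d) d).contains k = true := by
  induction l with
  | nil => intro d k h; simpa using h
  | cons x xs ih =>
    intro d k h
    simp only [List.foldl_cons]
    apply ih
    split
    · rw [PySem.Dict.contains_insert]; simp [h]
    · exact h

-- and it never changes the key list either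
lemma pv_fold_keys (l : List (Int × Char)) : ∀ (d : PySem.Dict String Int),
    (l.foldl (fun (d : PySem.Dict String Int) p =>
        if d.contains (String.singleton p.2) then d.insert (String.singleton p.2) p.1 else d) d).keys = d.keys := by
  induction l with
  | nil => intro d; rfl
  | cons x xs ih =>
    intro d
    simp only [List.foldl_cons]
    rw [ih]
    split
    · exact PySem.Dict.keys_insert_of_contains _ _ (h := by assumption)
    · rfl

-- the backward overwriting pass ends with the FIRST occurrence (last write wins)
lemma pv_revfold_get? (cs : List Char) : ∀ (n : Int) (d : PySem.Dict String Int) (c : Char),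
    d.contains (String.singleton c) = true →
    ((PySem.List.enumerate cs n).reverse.foldl (fun (d : PySem.Dict String Int) p =>
        if d.contains (String.singleton p.2) then d.insert (String.singleton p.2) p.1 else d) d).get?
      (String.singleton c)
      = ((List.idxOf? c cs).map (fun j => n + (j : Int))).or (d.get? (String.singleton c)) := by
  induction cs with
  | nil => intro n d c _; simp [PySem.List.enumerate_nil]
  | cons x xs ih =>
    intro n d c hc
    rw [PySem.List.enumerate_cons, List.reverse_cons, List.foldl_append]
    simp only [List.foldl_cons, List.foldl_nil]
    by_cases hcx : c = x
    · subst hcx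
      rw [if_pos (pv_fold_contains _ _ _ hc), PySem.Dict.get?_insert_self]
      simp [List.idxOf?_cons]
    · have hne : String.singleton c ≠ String.singleton x := fun h => hcx (pv_singleton_inj h)
      have hidx : List.idxOf? c (x :: xs) = (List.idxOf? c xs).map (· + 1) := by
        simp [List.idxOf?_cons, Ne.symm hcx]
      have hget : ∀ F : PySem.Dict String Int,
          (if F.contains (String.singleton x) then F.insert (String.singleton x) n else F).get?
            (String.singleton c) = F.get? (String.singleton c) := by
        intro F; split
        · exact PySem.Dict.get?_insert_of_ne _ _ hne
        · rfl
      rw [hget, ih (n + 1) d c hc, hidx]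
      cases List.idxOf? c xs <;> cases d.get? (String.singleton c) <;> (simp; try omega)

-- [c] is an infix of cs iff c occurs in cs
lemma pv_singleton_infix (c : Char) (cs : List Char) : [c] <:+: cs ↔ c ∈ cs := by
  constructor
  · intro h; exact h.mem (List.mem_singleton_self c)
  · intro h
    obtain ⟨pre, suf, rfl⟩ := List.append_of_mem h
    exact ⟨pre, suf, by simp⟩

-- [c] is a prefix of l iff l starts with c
lemma pv_singleton_prefix (c : Char) (l : List Char) : [c] <+: l ↔ l.head? = some c := by
  cases l with
  | nil => simp
  | cons y ys => simp [List.cons_prefix_cons]; tauto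

-- A's str.find of a single character equals the first-occurrence index (or -1)
lemma pv_find_singleton (s : String) (c : Char) :
    PySem.Str.find s (String.singleton c)
      = ((List.idxOf? c s.toList).map (fun k => (k : Int))).getD (-1) := by
  rw [PySem.Str.find_eq, String.toList_singleton]
  cases h : List.idxOf? c s.toList with
  | none =>
    have hm : c ∉ s.toList := List.idxOf?_eq_none_iff.mp h
    have : ¬ [c] <:+: s.toList := fun hinf => hm ((pv_singleton_infix c s.toList).mp hinf)
    simpa using (PySem.Chars.find_eq_neg_one_iff s.toList [c]).mpr this
  | some k =>
    obtain ⟨hk, hck, hmin⟩ := List.idxOf?_eq_some_iff.mp h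
    have hmem : c ∈ s.toList := hck ▸ List.getElem_mem hk
    have hpos : 0 ≤ PySem.Chars.find s.toList [c] :=
      (PySem.Chars.find_nonneg_iff s.toList [c]).mpr ((pv_singleton_infix c s.toList).mpr hmem)
    obtain ⟨hpre, hfirst⟩ := PySem.Chars.find_spec hpos
    set m := (PySem.Chars.find s.toList [c]).toNat with hm
    have hmc : s.toList[m]? = some c := by
      have := (pv_singleton_prefix c _).mp hpre
      rwa [List.head?_drop] at this
    have hkm : k = m := by
      by_contra hne
      rcases Nat.lt_or_ge k m with hlt | hge
      · exact hfirst k hlt ((pv_singleton_prefix c _).mpr (by rw [List.head?_drop]; exact List.getElem?_eq_some_iff.mpr ⟨hk, hck⟩))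
      · have hmk : m < k := lt_of_le_of_ne hge (fun e => hne e.symm)
        exact hmin m hmk ((List.getElem?_eq_some_iff.mp hmc).2)
    rw [hkm]
    have hred : ((some m).map (fun k => (k : Int))).getD (-1) = (m : Int) := rfl
    rw [hred]
    exact (Int.toNat_of_nonneg hpos).symm

-- B's table lookup after the backward pass is exactly A's find, per character
lemma pv_lookup (s : String) (c : Char) (d : PySem.Dict String Int)
    (hc : d.get? (String.singleton c) = some (-1)) :
    (((PySem.List.enumerate s.toList).reverse.foldl (fun (d : PySem.Dict String Int) p =>
        if d.contains (String.singleton p.2) then d.insert (String.singleton p.2) p.1 else d) d).get?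
      (String.singleton c)).getD (-1)
      = PySem.Str.find s (String.singleton c) := by
  have hcont : d.contains (String.singleton c) = true := by
    rw [PySem.Dict.contains_eq_isSome_get?, hc]; rfl
  rw [pv_revfold_get? _ _ _ _ hcont, hc, pv_find_singleton]
  cases List.idxOf? c s.toList <;> simp

-- ===== VERDICT (by name: the statement is the Claim_ definition above) =====
set_option maxRecDepth 8192 in
theorem get_dimorder_spec : Claim_equal_get_dimorder := by
  intro s _
  unfold Spec_get_dimorder get_dimorder get_dimorder_alt
  simp only [List.map]
  set Bd := List.foldl
      (fun (d : PySem.Dict String Int) p =>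
        if d.contains (String.singleton p.2) then d.insert (String.singleton p.2) p.1 else d)
      (List.foldl (fun (d : PySem.Dict String Int) k => d.insert k (-1)) PySem.Dict.empty
        ["B", "S", "T", "C", "Z", "Y", "X", "0"])
      (PySem.List.enumerate s.toList).reverse with hBd
  have hkeys : Bd.keys = ["B", "S", "T", "C", "Z", "Y", "X", "0"] := by
    rw [hBd, pv_fold_keys]; rfl
  rw [PySem.Dict.items_eq_map_keys Bd (by rw [hkeys]; decide) (-1), hkeys]
  have hc : ∀ c ∈ (['B', 'S', 'T', 'C', 'Z', 'Y', 'X', '0'] : List Char),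
      (List.foldl (fun (d : PySem.Dict String Int) k => d.insert k (-1)) PySem.Dict.empty
        ["B", "S", "T", "C", "Z", "Y", "X", "0"]).get? (String.singleton c) = some (-1) := by intro c hcm; fin_cases hcm <;> rfl
  simp only [List.map, PySem.Dict.getD_eq_get?_getD]
  rw [show ("B" : String) = String.singleton 'B' from rfl,
      show ("S" : String) = String.singleton 'S' from rfl,
      show ("T" : String) = String.singleton 'T' from rfl,
      show ("C" : String) = String.singleton 'C' from rfl,
      show ("Z" : String) = String.singleton 'Z' from rfl,
      show ("Y" : String) = String.singleton 'Y' from rfl,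
      show ("X" : String) = String.singleton 'X' from rfl,
      show ("0" : String) = String.singleton '0' from rfl,
      hBd,
      pv_lookup s 'B' _ (hc 'B' (by decide)),
      pv_lookup s 'S' _ (hc 'S' (by decide)),
      pv_lookup s 'T' _ (hc 'T' (by decide)),
      pv_lookup s 'C' _ (hc 'C' (by decide)),
      pv_lookup s 'Z' _ (hc 'Z' (by decide)),
      pv_lookup s 'Y' _ (hc 'Y' (by decide)),
      pv_lookup s 'X' _ (hc 'X' (by decide)),
      pv_lookup s '0' _ (hc '0' (by decide))]
  rfl
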